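-- pv_equiv track=rewrite | github.com/kmario23/tweethops | code/complete_hop_algorithm.py | compute_hop1_overlap
-- ===== SOURCE A (Python) =====
-- def compute_hop1_overlap(rtrIDS, folrIDS, twtr_name):
--     """To determine overlap between user ANON's followers and
--        retweeters of a particular tweet by user ANON
--     """
--     direct_folrs = []
--     for ID in rtrIDS:
--         if ID in folrIDS:
--             direct_folrs.append(1)
--         else:
--             direct_folrs.append(0)
--
--     # determine if (rtrIDS is subset of folrIDS)
--     subset_chk = set(rtrIDS).issubset(set(folrIDS))
--     disjoint_chk = set(rtrIDS).isdisjoint(set(folrIDS))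
--
--     return direct_folrs, subset_chk, disjoint_chk
-- ===== SOURCE B (Python) =====
-- def compute_hop1_overlap(rtrIDS, folrIDS, twtr_name):
--     """Single pass over rtrIDS against one follower set, deriving the
--        subset/disjoint flags from the same scan."""
--     followers = set(folrIDS)
--     direct_folrs = []
--     subset_chk = True
--     disjoint_chk = True
--     for ID in rtrIDS:
--         if ID in followers:
--             direct_folrs.append(1)
--             disjoint_chk = False
--         else:
--             direct_folrs.append(0)
--             subset_chk = False
--     return direct_folrs, subset_chk, disjoint_chk
-- ===== Notes on version B (the rewrite author's own statement) =====
-- stated objective: faster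
-- what changed: One follower set built once and a single pass over rtrIDS that appends 1/0 while maintaining the subset and disjoint flags as running booleans, replacing A's per-element linear scan of folrIDS plus two extra set constructions and issubset/isdisjoint calls.
import Mathlib
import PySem

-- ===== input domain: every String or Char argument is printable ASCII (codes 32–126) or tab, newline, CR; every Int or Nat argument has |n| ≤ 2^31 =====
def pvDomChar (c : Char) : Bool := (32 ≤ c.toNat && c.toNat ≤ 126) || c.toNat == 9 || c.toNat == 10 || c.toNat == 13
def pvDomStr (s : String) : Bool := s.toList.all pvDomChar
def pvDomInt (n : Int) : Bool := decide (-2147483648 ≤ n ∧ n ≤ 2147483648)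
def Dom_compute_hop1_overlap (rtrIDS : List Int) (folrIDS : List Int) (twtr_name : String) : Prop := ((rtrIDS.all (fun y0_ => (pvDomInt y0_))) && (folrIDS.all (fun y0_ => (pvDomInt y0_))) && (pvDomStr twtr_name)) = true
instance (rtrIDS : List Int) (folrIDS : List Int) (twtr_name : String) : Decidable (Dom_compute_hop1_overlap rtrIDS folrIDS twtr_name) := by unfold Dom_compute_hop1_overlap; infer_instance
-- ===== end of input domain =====

-- B builds one follower set and derives direct_folrs and both flags in a single pass over rtrIDS (asymptotically faster than A's per-element scan of folrIDS).


-- ===== PORT A =====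
def compute_hop1_overlap (rtrIDS : List Int) (folrIDS : List Int) (twtr_name : String) : List Int × Bool × Bool :=
  let direct_folrs : List Int :=
    rtrIDS.foldl (fun acc ID => if folrIDS.contains ID then acc ++ [1] else acc ++ [0]) []
  let subset_chk := PySem.Set.issubset (PySem.Set.ofList rtrIDS) (PySem.Set.ofList folrIDS)
  let disjoint_chk := PySem.Set.isdisjoint (PySem.Set.ofList rtrIDS) (PySem.Set.ofList folrIDS)
  (direct_folrs, subset_chk, disjoint_chk)

-- ===== PORT B =====
def compute_hop1_overlap_alt (rtrIDS : List Int) (folrIDS : List Int) (twtr_name : String) : List Int × Bool × Bool :=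
  let followers : PySem.Set Int := PySem.Set.ofList folrIDS
  rtrIDS.foldl
    (fun st ID =>
      if PySem.Set.contains followers ID then (st.1 ++ [1], st.2.1, false)
      else (st.1 ++ [0], false, st.2.2))
    ([], true, true)

-- ===== PRECONDITION & SPEC =====
def Spec_compute_hop1_overlap (rtrIDS : List Int) (folrIDS : List Int) (twtr_name : String) (out : List Int × Bool × Bool) : Prop := out = compute_hop1_overlap_alt rtrIDS folrIDS twtr_name
instance (rtrIDS : List Int) (folrIDS : List Int) (twtr_name : String) (out : List Int × Bool × Bool) : Decidable (Spec_compute_hop1_overlap rtrIDS folrIDS twtr_name out) := by unfold Spec_compute_hop1_overlap; infer_instance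

-- ===== CLAIM (what is proved, stated in full; the proofs are below) =====
def Claim_equal_compute_hop1_overlap : Prop := ∀ (rtrIDS : List Int) (folrIDS : List Int) (twtr_name : String), Dom_compute_hop1_overlap rtrIDS folrIDS twtr_name → Spec_compute_hop1_overlap rtrIDS folrIDS twtr_name (compute_hop1_overlap rtrIDS folrIDS twtr_name)

-- ===== LEMMAS AND PROOFS =====

-- B's single fold, over an abstract membership test p: the 1/0 map appended to acc, and the two flags conjoined with all/none-membership.
lemma alt_fold (p : Int → Bool) (rtr : List Int) (acc : List Int) (s d : Bool) :
    rtr.foldl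
      (fun st ID =>
        if p ID then (st.1 ++ [1], st.2.1, false)
        else (st.1 ++ [0], false, st.2.2))
      (acc, s, d)
    = (acc ++ rtr.map (fun ID => if p ID then (1 : Int) else 0),
       s && rtr.all p,
       d && rtr.all (fun ID => ! p ID)) := by
  induction rtr generalizing acc s d with
  | nil => simp
  | cons x xs ih =>
    by_cases hx : p x = true <;>
      simp [hx, ih]

-- A's loop with an arbitrary accumulator and abstract membership test is the accumulator followed by the 1/0 map.
lemma a_fold (p : Int → Bool) (rtr : List Int) (acc : List Int) :
    rtr.foldl (fun acc ID => if p ID then acc ++ [1] else acc ++ [0]) acc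
    = acc ++ rtr.map (fun ID => if p ID then (1 : Int) else 0) := by
  induction rtr generalizing acc with
  | nil => simp
  | cons x xs ih =>
    by_cases hx : p x = true <;> simp [hx, ih]

lemma contains_ofList (folr : List Int) (x : Int) :
    PySem.Set.contains (PySem.Set.ofList folr) x = folr.contains x := by
  rw [Bool.eq_iff_iff]
  simp [PySem.Set.contains, PySem.Set.mem_ofList]

lemma issubset_eq_all (rtr folr : List Int) :
    PySem.Set.issubset (PySem.Set.ofList rtr) (PySem.Set.ofList folr)
    = rtr.all (fun ID => folr.contains ID) := by
  rw [Bool.eq_iff_iff]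
  simp [PySem.Set.issubset_iff, PySem.Set.mem_ofList]

lemma isdisjoint_eq_all (rtr folr : List Int) :
    PySem.Set.isdisjoint (PySem.Set.ofList rtr) (PySem.Set.ofList folr)
    = rtr.all (fun ID => ! folr.contains ID) := by
  rw [Bool.eq_iff_iff]
  simp [PySem.Set.isdisjoint_iff, PySem.Set.mem_ofList]

-- ===== VERDICT (by name: the statement is the Claim_ definition above) =====
theorem compute_hop1_overlap_spec : Claim_equal_compute_hop1_overlap := by
  intro rtr folr name _
  unfold Spec_compute_hop1_overlap compute_hop1_overlap compute_hop1_overlap_alt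
  rw [alt_fold (fun ID => PySem.Set.contains (PySem.Set.ofList folr) ID),
      a_fold (fun ID => folr.contains ID)]
  simp only [contains_ofList, issubset_eq_all, isdisjoint_eq_all, Bool.true_and, List.nil_append]
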